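-- pv_equiv track=rewrite | github.com/blashy101/WindowsCE-ALB-Scripts | imageconv_a1rgb555.py | mask_info
-- ===== SOURCE A (Python) =====
-- def mask_info(mask):
--     if mask == 0: return (0,0,0)
--     shift = (mask & -mask).bit_length() - 1
--     m = mask >> shift
--     bits = m.bit_length()
--     while bits>0 and (m & 1)==0:
--         m >>= 1; shift += 1; bits -= 1
--     maxv = (1<<bits) - 1 if bits>0 else 0
--     return shift, bits, maxv
-- ===== SOURCE B (Python) =====
-- def mask_info(mask):
--     if mask == 0:
--         return (0, 0, 0)
--     shift = 0
--     while (mask >> shift) & 1 == 0: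
--         shift += 1
--     bits = mask.bit_length() - shift
--     return (shift, bits, (1 << bits) - 1)
-- ===== Notes on version B (the rewrite author's own statement) =====
-- stated objective: simpler
-- what changed: Replaces A's (mask & -mask).bit_length()-1 bit trick, its defensive dead shift-and-measure loop and the bits>0 guard by an explicit trailing-zero scan and a single subtraction bits = mask.bit_length() - shift.
import Mathlib
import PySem

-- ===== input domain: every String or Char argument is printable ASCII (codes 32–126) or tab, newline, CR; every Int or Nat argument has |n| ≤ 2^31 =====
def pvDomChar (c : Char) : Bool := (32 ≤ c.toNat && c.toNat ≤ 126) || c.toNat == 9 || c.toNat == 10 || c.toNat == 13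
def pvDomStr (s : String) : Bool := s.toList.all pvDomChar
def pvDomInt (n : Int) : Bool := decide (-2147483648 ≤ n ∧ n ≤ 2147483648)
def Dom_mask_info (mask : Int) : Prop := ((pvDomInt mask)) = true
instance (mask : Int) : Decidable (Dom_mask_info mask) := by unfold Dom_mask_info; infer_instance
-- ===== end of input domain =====

-- B replaces A's `(mask & -mask).bit_length() - 1` bit trick and its shift-and-measure loop by an
-- explicit trailing-zero scan plus `bits = mask.bit_length() - shift` (objective: simpler decomposition).

-- ===== PORT A =====
-- while bits>0 and (m & 1)==0: m >>= 1; shift += 1; bits -= 1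
def mask_info_loop (m : Int) (shift bits : Nat) : Int × Nat × Nat :=
  if h : 0 < bits ∧ PySem.Int.band m 1 = 0 then
    mask_info_loop (m >>> 1) (shift + 1) (bits - 1)
  else (m, shift, bits)
termination_by bits
decreasing_by omega

def mask_info (mask : Int) : Int × Int × Int :=
  if mask = 0 then (0, 0, 0) else
    let shift := PySem.Int.bitLength (PySem.Int.band mask (-mask)) - 1
    let m := mask >>> shift
    let bits := PySem.Int.bitLength m
    let r := mask_info_loop m shift bits
    let maxv : Int := if 0 < r.2.2 then ((1 : Int) <<< r.2.2) - 1 else 0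
    ((r.2.1 : Int), (r.2.2 : Int), maxv)

-- ===== PORT B =====
-- while (mask >> shift) & 1 == 0: shift += 1   (the fuel argument only makes the loop total;
-- it is proved sufficient for every mask ≠ 0, so the scan computes exactly what Source B computes)
def mask_info_scan (mask : Int) (shift : Nat) : Nat → Nat
  | 0 => shift
  | fuel + 1 =>
    if PySem.Int.band (mask >>> shift) 1 = 0 then mask_info_scan mask (shift + 1) fuel
    else shift

def mask_info_alt (mask : Int) : Int × Int × Int :=
  if mask = 0 then (0, 0, 0) else
    let shift := mask_info_scan mask 0 (PySem.Int.bitLength mask)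
    let bits : Int := (PySem.Int.bitLength mask : Int) - (shift : Int)
    -- `1 << bits`: bits ≥ 1 whenever mask ≠ 0 (proved below), so `.toNat` is exact
    ((shift : Int), bits, ((1 : Int) <<< bits.toNat) - 1)

-- ===== PRECONDITION & SPEC =====
def Spec_mask_info (mask : Int) (out : Int × Int × Int) : Prop := out = mask_info_alt mask
instance (mask : Int) (out : Int × Int × Int) : Decidable (Spec_mask_info mask out) := by unfold Spec_mask_info; infer_instance

-- ===== CLAIM (what is proved, stated in full; the proofs are below) =====
def Claim_equal_mask_info : Prop := ∀ (mask : Int), Dom_mask_info mask → Spec_mask_info mask (mask_info mask)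

-- ===== LEMMAS AND PROOFS =====

-- for odd o, every set bit of o-1 is a set bit of o (they differ only in bit 0)
theorem pv_odd_land_pred (o : Nat) (i : Nat) (ho : o % 2 = 1) :
    (o.testBit i && (o - 1).testBit i) = (o - 1).testBit i := by
  obtain ⟨k, rfl⟩ : ∃ k, o = 2 * k + 1 := ⟨o / 2, by omega⟩
  cases i with
  | zero => simp [Nat.testBit_zero]
  | succ i =>
      rw [Nat.testBit_succ, Nat.testBit_succ]
      have h1 : (2 * k + 1) / 2 = k := by omega
      have h2 : (2 * k + 1 - 1) / 2 = k := by omega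
      rw [h1, h2, Bool.and_self]

-- n = 2^t * o with o odd: n &&& (n-1) clears the lowest set bit
theorem pv_land_pred (t o : Nat) (ho : o % 2 = 1) :
    (2 ^ t * o) &&& (2 ^ t * o - 1) = 2 ^ t * o - 2 ^ t := by
  have hP : 1 ≤ 2 ^ t := Nat.one_le_two_pow
  have ho1 : 1 ≤ o := by omega
  have hmul : 2 ^ t * o = 2 ^ t * (o - 1) + 2 ^ t := by
    have h : 2 ^ t * o = 2 ^ t * (o - 1) + 2 ^ t * 1 := by
      rw [← Nat.mul_add]; congr 1; omega
    simpa using h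
  have hsub1 : 2 ^ t * o - 1 = 2 ^ t * (o - 1) + (2 ^ t - 1) := by omega
  have hsub2 : 2 ^ t * o - 2 ^ t = 2 ^ t * (o - 1) := by omega
  apply Nat.eq_of_testBit_eq; intro j
  rw [Nat.testBit_land, hsub1, hsub2,
      Nat.testBit_two_pow_mul_add (o - 1) (by omega) j,
      show 2 ^ t * o = o * 2 ^ t by ring, Nat.testBit_mul_two_pow,
      show 2 ^ t * (o - 1) = (o - 1) * 2 ^ t by ring, Nat.testBit_mul_two_pow]
  by_cases hj : j < t
  · simp [hj, (show ¬ t ≤ j by omega)]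
  · simp only [if_neg hj, show t ≤ j by omega, decide_true, Bool.true_and]
    exact pv_odd_land_pred o (j - t) ho

-- Python's `mask & -mask` through PySem.Int.band: both sign cases reduce to N - (N &&& (N-1))
theorem pv_band_neg_selfN (mask : Int) (N lsb : Nat) (hN : 0 < N) (hlsb : 0 < lsb)
    (hland : N &&& (N - 1) = N - lsb) (hle : lsb ≤ N)
    (hm : mask = (N : Int) ∨ mask = -(N : Int)) :
    PySem.Int.band mask (-mask) = (lsb : Int) := by
  rcases hm with hm | hm <;> rw [hm, PySem.Int.band]
  · rw [if_pos (by omega : (0:Int) ≤ (N:Int)), if_neg (by omega : ¬ (0:Int) ≤ -(N:Int))]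
    have h1 : ((N:Int)).toNat = N := by omega
    have h2 : (-(-((N:Int))) - 1).toNat = N - 1 := by omega
    rw [h1, h2, hland]; omega
  · rw [if_neg (by omega : ¬ (0:Int) ≤ -(N:Int)), if_pos (by omega : (0:Int) ≤ -(-(N:Int)))]
    have h1 : (-(-((N:Int)))).toNat = N := by omega
    have h2 : (-(-((N:Int))) - 1).toNat = N - 1 := by omega
    rw [h1, h2, hland]; omega

theorem pv_bitLength_pow_mul (t o : Nat) (ho : 0 < o) :
    PySem.Int.bitLength ((2 ^ t * o : Nat) : Int) = t + PySem.Int.bitLength (o : Int) := by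
  induction t with
  | zero => simp
  | succ t ih =>
      have hpos : 0 < 2 ^ (t + 1) * o := by positivity
      rw [PySem.Int.bitLength_natCast hpos]
      have hdiv : 2 ^ (t + 1) * o / 2 = 2 ^ t * o := by
        rw [pow_succ, show 2 ^ t * 2 * o = 2 ^ t * o * 2 by ring, Nat.mul_div_cancel _ (by omega)]
      rw [hdiv, ih]; omega

-- Python `>> j` (floor) is exact division when 2^j divides the operand, for either sign
theorem pv_shr_neg (q j : Nat) (hq : 0 < q) :
    (-((2 ^ j * q : Nat) : Int)) >>> j = -(q : Int) := by
  have hP : 0 < 2 ^ j := Nat.two_pow_pos j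
  have h1 : (2 ^ j * q : Nat) = (2 ^ j * q - 1) + 1 := by
    have h : 0 < 2 ^ j * q := by positivity
    omega
  rw [show (-((2 ^ j * q : Nat) : Int)) = Int.negSucc (2 ^ j * q - 1) by
        rw [Int.negSucc_eq]; rw [h1]; push_cast; ring]
  show Int.negSucc ((2 ^ j * q - 1) >>> j) = -(q : Int)
  have h2 : (2 ^ j * q - 1) >>> j = q - 1 := by
    rw [Nat.shiftRight_eq_div_pow]
    have h3 : 2 ^ j * q - 1 = (2 ^ j - 1) + 2 ^ j * (q - 1) := by
      have h : 2 ^ j * q = 2 ^ j * (q - 1) + 2 ^ j := by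
        rw [← Nat.mul_succ]; congr 1; omega
      omega
    rw [h3, Nat.add_mul_div_left _ _ hP, Nat.div_eq_of_lt (by omega), Nat.zero_add]
  rw [h2, Int.negSucc_eq]
  have h4 : ((q - 1 : Nat) : Int) = (q : Int) - 1 := by omega
  rw [h4]; ring

theorem pv_shr_pos (q j : Nat) :
    (((2 ^ j * q : Nat) : Int)) >>> j = (q : Int) := by
  have hP : 0 < 2 ^ j := Nat.two_pow_pos j
  show ((((2 ^ j * q : Nat)) >>> j : Nat) : Int) = (q : Int)
  rw [Nat.shiftRight_eq_div_pow, Nat.mul_div_cancel_left _ hP]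

theorem pv_odd_band_one (m : Int) (o : Nat) (ho : o % 2 = 1)
    (hm : m = (o : Int) ∨ m = -(o : Int)) : PySem.Int.band m 1 = 1 := by
  rw [PySem.Int.band_one, PySem.Int.mod_eq_emod_of_pos (by omega)]
  rcases hm with hm | hm <;> subst hm <;> omega

theorem pv_even_band_one (m : Int) (k : Nat)
    (hm : m = ((2 * k : Nat) : Int) ∨ m = -((2 * k : Nat) : Int)) :
    PySem.Int.band m 1 = 0 := by
  rw [PySem.Int.band_one, PySem.Int.mod_eq_emod_of_pos (by omega)]
  rcases hm with hm | hm <;> subst hm <;> push_cast <;> omega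

-- A's while loop exits at once: after the shift the low bit is 1
theorem pv_loop_stop (m : Int) (shift bits : Nat) (h : PySem.Int.band m 1 = 1) :
    mask_info_loop m shift bits = (m, shift, bits) := by
  rw [mask_info_loop]
  simp [h]

-- B's scan reaches exactly the lowest set-bit position t (fuel > t - start suffices)
theorem pv_scan_eq (mask : Int) (t : Nat)
    (hbit0 : ∀ j < t, PySem.Int.band (mask >>> j) 1 = 0)
    (hbitt : PySem.Int.band (mask >>> t) 1 = 1) :
    ∀ (fuel j : Nat), j ≤ t → t < j + fuel → mask_info_scan mask j fuel = t := by
  intro fuel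
  induction fuel with
  | zero => intro j hj hlt; omega
  | succ f ih =>
      intro j hj hlt
      rw [mask_info_scan]
      by_cases hjt : j = t
      · subst hjt; rw [hbitt]; simp
      · rw [hbit0 j (by omega), if_pos rfl]
        exact ih (j + 1) (by omega) (by omega)

-- main equivalence on nonzero masks, via the factorisation mask = ±(2^t * o), o odd
theorem pv_main_ne (mask : Int) (h0 : mask ≠ 0) : mask_info mask = mask_info_alt mask := by
  obtain ⟨t, o, hoodd, hfact⟩ := Nat.exists_eq_two_pow_mul_odd (n := mask.natAbs)
    (by simpa using h0)
  have ho : o % 2 = 1 := Nat.odd_iff.mp hoodd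
  have hP : 0 < 2 ^ t := Nat.two_pow_pos t
  have hNpos : 0 < 2 ^ t * o := Nat.mul_pos hP (by omega)
  have hsign : mask = ((2 ^ t * o : Nat) : Int) ∨ mask = -((2 ^ t * o : Nat) : Int) := by
    rcases Int.natAbs_eq mask with hm | hm
    · left; rw [hm, hfact]
    · right; rw [hm, hfact]
  have hband : PySem.Int.band mask (-mask) = ((2 ^ t : Nat) : Int) :=
    pv_band_neg_selfN mask (2 ^ t * o) (2 ^ t) hNpos hP
      (pv_land_pred t o ho) (Nat.le_mul_of_pos_right _ (by omega)) hsign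
  have hbl1 : (1 : Nat) ≤ PySem.Int.bitLength (o : Int) := by
    rw [PySem.Int.bitLength_natCast (by omega : 0 < o)]; omega
  set L := PySem.Int.bitLength (o : Int) with hLdef
  have hblo := pv_bitLength_pow_mul t o (by omega)
  have hblmask : PySem.Int.bitLength mask = t + L := by
    rcases hsign with hm | hm
    · rw [hm]; exact hblo
    · rw [hm, PySem.Int.bitLength_neg]; exact hblo
  have hbl2t : PySem.Int.bitLength ((2 ^ t : Nat) : Int) = t + 1 := by
    have h1 := pv_bitLength_pow_mul t 1 (by omega)
    simpa using h1
  have hm : mask >>> t = (o : Int) ∨ mask >>> t = -(o : Int) := by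
    rcases hsign with hm | hm <;> rw [hm]
    · left; exact pv_shr_pos o t
    · right; exact pv_shr_neg o t (by omega)
  have hmodd : PySem.Int.band (mask >>> t) 1 = 1 := pv_odd_band_one _ o ho hm
  have hblm : PySem.Int.bitLength (mask >>> t) = L := by
    rcases hm with h | h
    · rw [h]
    · rw [h, PySem.Int.bitLength_neg]
  have hbit0 : ∀ j < t, PySem.Int.band (mask >>> j) 1 = 0 := by
    intro j hj
    have h2 : (2:Nat) ^ j * (2 * 2 ^ (t - j - 1)) = 2 ^ t := by
      rw [show (2:Nat) * 2 ^ (t - j - 1) = 2 ^ (t - j - 1 + 1) by rw [pow_succ]; ring,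
          ← pow_add]
      congr 1; omega
    have hfj : (2:Nat) ^ t * o = 2 ^ j * (2 * (2 ^ (t - j - 1) * o)) := by
      rw [← h2]; ring
    apply pv_even_band_one _ (2 ^ (t - j - 1) * o)
    have hq : 0 < 2 * (2 ^ (t - j - 1) * o) := by
      have h := Nat.two_pow_pos (t - j - 1)
      exact Nat.mul_pos (by omega) (Nat.mul_pos h (by omega))
    rcases hsign with hs | hs
    · left; rw [hs, hfj]; exact pv_shr_pos _ j
    · right; rw [hs, hfj]; exact pv_shr_neg _ j hq
  simp only [mask_info, mask_info_alt, if_neg h0]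
  rw [hband, hbl2t, hblmask]
  simp only [Nat.add_sub_cancel]
  rw [pv_loop_stop _ _ _ hmodd, hblm]
  rw [pv_scan_eq mask t hbit0 hmodd (t + L) 0 (by omega) (by omega)]
  have hL' : ((t + L : Nat) : Int) - ((t : Nat) : Int) = ((L : Nat) : Int) := by push_cast; ring
  rw [hL']
  rw [show ((L : Nat) : Int).toNat = L from rfl, if_pos (by omega : 0 < L)]

-- ===== VERDICT (by name: the statement is the Claim_ definition above) =====
theorem mask_info_spec : Claim_equal_mask_info := by
  intro mask _
  unfold Spec_mask_info
  by_cases h0 : mask = 0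
  · subst h0; rfl
  · exact pv_main_ne mask h0
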